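-- pv_equiv track=rewrite | github.com/tomlinsonk/diverging-string-seqs | tree_error.py | asymmetric_distance
-- ===== SOURCE A (Python) =====
-- def asymmetric_distance(x, y, distances):
--     """
--     Compute the asymmetric edit distance (no deletions) between two string sequences, using precomputed EDs
--     :param x: the first string (can't delete from here)
--     :param y: the second string (can insert here)
--     :param distances: a dict from tuples (a, b) to ED(a, b
--     :return: the int AD(x, y)
--     """
--     while len(x) > len(y):
--         y.append('')  # to get an estimate of err(T) for the errorful tree T~
--         # raise RuntimeError('AD(x, y) is undefined when |x| > |y| (|x| = {}, |y| = {})'.format(len(x), len(y)))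
--
--     # dist[i][j] is the assymetric distance between x[i:] and y[j:]
--     dist = [[None for _ in range(len(y) + 1)] for _ in range(len(x) + 1)]
--
--     # Initialize matrix
--     dist[len(x)][len(y)] = 0
--
--     # Fill in bottommost row
--     # '' -> b[j:] = inserting each character in y[j:]
--     for j in range(len(y) - 1, -1, -1):
--         dist[len(x)][j] = dist[len(x)][j + 1] + len(y[j])
--
--     # Fill in the rest of the dist matrix right to left, bottom to top
--     for i in range(len(x) - 1, -1, -1):
--         for j in range(len(y) - 1, -1, -1):
--             if len(x) - i == len(y) - j:
--                 dist[i][j] = dist[i + 1][j + 1] + distances[x[i], y[j]]  # must sub if same length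
--             elif len(x) - i < len(y) - j:
--                 insert = dist[i][j + 1] + len(y[j])
--                 sub = dist[i + 1][j + 1] + distances[x[i], y[j]]
--                 dist[i][j] = min(insert, sub)
--
--     return dist[0][0]
-- ===== SOURCE B (Python) =====
-- def asymmetric_distance(x, y, distances):
--     """Different formulation: AD is the cheapest order-preserving matching of each
--     x[i] to some y[k]; unmatched y[k] cost len(y[k]).  For each row we take the min
--     over the MATCH POSITION k of x[i] using prefix sums of len(y) and one running
--     suffix minimum, instead of the insert/substitute cell recurrence and matrix.
--     Mutates y in place exactly like the original (pads with '')."""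
--     while len(x) > len(y):
--         y.append('')
--     n, m = len(x), len(y)
--     # prefix sums: S[j] = len(y[0]) + ... + len(y[j-1])
--     S = [0]
--     for s in y:
--         S.append(S[-1] + len(s))
--     # nxt[j] = AD(x[i+1:], y[j:]); base row (i = n): insert all of y[j:]
--     nxt = [S[m] - S[j] for j in range(m + 1)]
--     for i in range(n - 1, -1, -1):
--         w = m - n + i  # last position x[i] may match (leaves enough of y for the rest)
--         # AD(x[i:], y[j:]) = min_{j <= k <= w} (S[k] - S[j]) + ED(x[i], y[k]) + nxt[k+1]
--         best = S[w] + distances[x[i], y[w]] + nxt[w + 1]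
--         row = [best - S[w]]
--         for k in range(w - 1, -1, -1):
--             best = min(best, S[k] + distances[x[i], y[k]] + nxt[k + 1])
--             row.append(best - S[k])
--         row.reverse()
--         nxt = row
--     return nxt[0]
-- ===== Notes on version B (the rewrite author's own statement) =====
-- stated objective: alternative
-- what changed: B reformulates AD as the cheapest order-preserving matching of x-elements to y-positions and computes each row as a minimum over the match position of x[i], via prefix sums of len(y) and a single running suffix minimum, instead of A's insert/substitute cell recurrence over a full None-initialised (len(x)+1)x(len(y)+1) matrix.
import Mathlib
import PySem

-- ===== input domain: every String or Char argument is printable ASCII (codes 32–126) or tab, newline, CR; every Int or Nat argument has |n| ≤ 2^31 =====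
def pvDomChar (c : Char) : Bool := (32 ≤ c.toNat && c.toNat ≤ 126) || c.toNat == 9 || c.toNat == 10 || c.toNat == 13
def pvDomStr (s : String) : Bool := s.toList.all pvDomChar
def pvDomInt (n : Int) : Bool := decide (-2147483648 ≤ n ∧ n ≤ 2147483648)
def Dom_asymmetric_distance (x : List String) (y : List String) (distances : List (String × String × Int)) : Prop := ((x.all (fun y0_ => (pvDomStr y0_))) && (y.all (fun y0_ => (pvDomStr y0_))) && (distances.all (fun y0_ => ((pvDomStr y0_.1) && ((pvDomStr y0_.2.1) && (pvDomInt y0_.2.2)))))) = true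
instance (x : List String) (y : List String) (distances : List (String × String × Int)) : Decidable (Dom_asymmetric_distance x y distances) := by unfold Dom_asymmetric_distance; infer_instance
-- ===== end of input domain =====

-- B reformulates AD as the cheapest order-preserving matching of x-elements to y-positions:
-- each row is a minimum over the match position of x[i], computed with prefix sums of len(y)
-- and one running suffix minimum — no insert/substitute cell recurrence, no matrix
-- (objective: alternative, same asymptotic cost).
-- NOTE: Python A mutates its argument y in place (pads it with ''); Python B performs the
-- same mutation; the equivalence proved here is about the RETURN value.

-- ===== PORT A =====
-- shared helper: the "while len(x) > len(y): y.append('')" padding loop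
def pad (x y : List String) : List String :=
  if y.length < x.length then pad x (y ++ [""]) else y
termination_by x.length - y.length
decreasing_by simp [List.length_append]; omega

def dget (ds : List (String × String × Int)) (a b : String) : Option Int :=
  match ds with
  | [] => none
  | (p, q, v) :: t => if p = a ∧ q = b then some v else dget t a b

def botStep (y : List String) (n : Nat) (d : Nat → Nat → Option Int) (j : Int) :
    Nat → Nat → Option Int :=
  let jN := j.toNat
  fun i' j' => if i' = n ∧ j' = jN
    then some ((d n (jN + 1)).getD 0 + PySem.Str.len (y.getD jN ""))
    else d i' j'

def cellStepA (x y : List String) (ds : List (String × String × Int)) (i : Int)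
    (d : Nat → Nat → Option Int) (j : Int) : Nat → Nat → Option Int :=
  let n := x.length; let m := y.length
  let iN := i.toNat; let jN := j.toNat
  if (n : Int) - i = (m : Int) - j then
    fun i' j' => if i' = iN ∧ j' = jN
      then some ((d (iN + 1) (jN + 1)).getD 0 + (dget ds (x.getD iN "") (y.getD jN "")).getD 0)
      else d i' j'
  else if (n : Int) - i < (m : Int) - j then
    let ins := (d iN (jN + 1)).getD 0 + PySem.Str.len (y.getD jN "")
    let sub := (d (iN + 1) (jN + 1)).getD 0 + (dget ds (x.getD iN "") (y.getD jN "")).getD 0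
    fun i' j' => if i' = iN ∧ j' = jN then some (min ins sub) else d i' j'
  else d

def rowStepA (x y : List String) (ds : List (String × String × Int))
    (d : Nat → Nat → Option Int) (i : Int) : Nat → Nat → Option Int :=
  (PySem.List.pyRange ((y.length : Int) - 1) (-1) (-1)).foldl (cellStepA x y ds i) d

def asymmetric_distance (x : List String) (y : List String)
    (distances : List (String × String × Int)) : Int :=
  let y2 := pad x y
  let n := x.length
  let m := y2.length
  let d0 : Nat → Nat → Option Int := fun _ _ => none
  let d1 : Nat → Nat → Option Int := fun i j => if i = n ∧ j = m then some 0 else d0 i j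
  let d2 := (PySem.List.pyRange ((m : Int) - 1) (-1) (-1)).foldl (botStep y2 n) d1
  let d3 := (PySem.List.pyRange ((n : Int) - 1) (-1) (-1)).foldl (rowStepA x y2 distances) d2
  (d3 0 0).getD 0

-- ===== PORT B =====
-- S = [0]; for s in y: S.append(S[-1] + len(s))
def prefSum (y : List String) : List Int :=
  y.foldl (fun S s => S ++ [S.getLastD 0 + PySem.Str.len s]) [0]

-- one step of the inner loop: best = min(best, S[k] + distances[x[i], y[k]] + nxt[k+1]);
-- row.append(best - S[k])   (all indices are in range, so getD is exact)
def innerStepB (y : List String) (ds : List (String × String × Int)) (s : String)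
    (S nxt : List Int) (acc : Int × List Int) (k : Int) : Int × List Int :=
  let kN := k.toNat
  let b := min acc.1 (S.getD kN 0 + (dget ds s (y.getD kN "")).getD 0 + nxt.getD (kN + 1) 0)
  (b, acc.2 ++ [b - S.getD kN 0])

def rowStepB (x y : List String) (ds : List (String × String × Int)) (S : List Int)
    (nxt : List Int) (i : Int) : List Int :=
  let n := x.length; let m := y.length
  let iN := i.toNat
  let w := m - n + iN          -- after padding m ≥ n, so Python's m - n + i is this Nat
  let s := x.getD iN ""
  let best := S.getD w 0 + (dget ds s (y.getD w "")).getD 0 + nxt.getD (w + 1) 0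
  let res := (PySem.List.pyRange ((w : Int) - 1) (-1) (-1)).foldl
      (innerStepB y ds s S nxt) (best, [best - S.getD w 0])
  res.2.reverse

def asymmetric_distance_alt (x : List String) (y : List String)
    (distances : List (String × String × Int)) : Int :=
  let y2 := pad x y
  let n := x.length
  let m := y2.length
  let S := prefSum y2
  let nxt0 : List Int := (List.range (m + 1)).map (fun j => S.getD m 0 - S.getD j 0)
  let nxtF := (PySem.List.pyRange ((n : Int) - 1) (-1) (-1)).foldl (rowStepB x y2 distances S) nxt0
  nxtF.headD 0

-- ===== PRECONDITION & SPEC =====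
-- Pre_ excludes exactly the inputs on which Python A raises a KeyError: some pair
-- (x[i], y[j]) that the DP looks up (j ≤ max(len x, len y) - len x + i, y padded with '')
-- is missing from distances. (B looks up the same keys in the same order, so it raises
-- there too; Pre_ is needed for both ports to be faithful to the Pythons.)
def Pre_asymmetric_distance (x : List String) (y : List String)
    (distances : List (String × String × Int)) : Prop :=
  ∀ i ∈ List.range x.length,
    ∀ j ∈ List.range (max x.length y.length - x.length + i + 1),
      (dget distances (x.getD i "") (y.getD j "")).isSome = true
instance (x : List String) (y : List String) (distances : List (String × String × Int)) : Decidable (Pre_asymmetric_distance x y distances) := by unfold Pre_asymmetric_distance; infer_instance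

def pvWitness_asymmetric_distance : List String × List String × (List (String × String × Int)) :=
  (["ab", "c"], ["abc"], [("ab", "abc", 1), ("ab", "", 2), ("c", "", 1), ("c", "abc", 3)])

def Spec_asymmetric_distance (x : List String) (y : List String) (distances : List (String × String × Int)) (out : Int) : Prop := out = asymmetric_distance_alt x y distances
instance (x : List String) (y : List String) (distances : List (String × String × Int)) (out : Int) : Decidable (Spec_asymmetric_distance x y distances out) := by unfold Spec_asymmetric_distance; infer_instance

-- ===== CLAIM (what is proved, stated in full; the proofs are below) =====
def Claim_equal_asymmetric_distance : Prop := ∀ (x : List String) (y : List String) (distances : List (String × String × Int)), Dom_asymmetric_distance x y distances → Pre_asymmetric_distance x y distances → Spec_asymmetric_distance x y distances (asymmetric_distance x y distances)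

-- ===== LEMMAS AND PROOFS =====
lemma le_pad_length (x y : List String) : x.length ≤ (pad x y).length := by
  fun_induction pad with
  | case1 y h ih => exact ih
  | case2 y h => omega

def SS (y : List String) : List Int :=
  match y with
  | [] => [0]
  | s :: t => (PySem.Str.len s + (SS t).headD 0) :: SS t

lemma SS_last (y : List String) : (SS y).getD y.length 0 = 0 := by
  induction y with
  | nil => rfl
  | cons s t ih => simpa [SS] using ih

lemma SS_step (y : List String) (j : Nat) (h : j < y.length) :
    (SS y).getD j 0 = PySem.Str.len (y.getD j "") + (SS y).getD (j + 1) 0 := by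
  induction y generalizing j with
  | nil => simp at h
  | cons s t ih =>
    cases j with
    | zero => cases t <;> simp [SS]
    | succ k => simpa [SS] using ih k (by simpa using h)

def Dref (x y : List String) (ds : List (String × String × Int)) (i j : Nat) : Int :=
  if h : i < x.length then
    if y.length - j = x.length - i then
      Dref x y ds (i + 1) (j + 1) + (dget ds (x.getD i "") (y.getD j "")).getD 0
    else if h2 : j < y.length then
      min (Dref x y ds i (j + 1) + PySem.Str.len (y.getD j ""))
          (Dref x y ds (i + 1) (j + 1) + (dget ds (x.getD i "") (y.getD j "")).getD 0)
    else 0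
  else (SS y).getD j 0
termination_by (x.length - i, y.length - j)
decreasing_by
  · exact Prod.Lex.left _ _ (by omega)
  · exact Prod.Lex.right' _ (by omega) (by omega)
  · exact Prod.Lex.left _ _ (by omega)

lemma Dref_base (x y : List String) (ds : List (String × String × Int)) (i j : Nat)
    (hi : x.length ≤ i) : Dref x y ds i j = (SS y).getD j 0 := by
  rw [Dref]; simp [Nat.not_lt.mpr hi]

lemma Dref_sub (x y : List String) (ds : List (String × String × Int)) (i j : Nat)
    (hi : i < x.length) (he : y.length - j = x.length - i) :
    Dref x y ds i j = Dref x y ds (i + 1) (j + 1) + (dget ds (x.getD i "") (y.getD j "")).getD 0 := by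
  rw [Dref]; simp [hi, he]

lemma Dref_min (x y : List String) (ds : List (String × String × Int)) (i j : Nat)
    (hi : i < x.length) (hj : j < y.length) (hne : y.length - j ≠ x.length - i) :
    Dref x y ds i j = min (Dref x y ds i (j + 1) + PySem.Str.len (y.getD j ""))
        (Dref x y ds (i + 1) (j + 1) + (dget ds (x.getD i "") (y.getD j "")).getD 0) := by
  rw [Dref]; simp [hi, hj, hne]

def RowOK (x y : List String) (ds : List (String × String × Int))
    (d : Nat → Nat → Option Int) (i jlo : Nat) : Prop :=
  ∀ j', jlo ≤ j' → j' ≤ y.length → x.length - i ≤ y.length - j' →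
    d i j' = some (Dref x y ds i j')

lemma cellStepA_ok (x y : List String) (ds : List (String × String × Int))
    (d : Nat → Nat → Option Int) (iN jN : Nat) (hi : iN < x.length) (hj : jN < y.length)
    (H1 : RowOK x y ds d (iN + 1) 0) (H2 : RowOK x y ds d iN (jN + 1)) :
    RowOK x y ds (cellStepA x y ds (iN : Int) d (jN : Int)) iN jN ∧
    ∀ i' j', i' ≠ iN → cellStepA x y ds (iN : Int) d (jN : Int) i' j' = d i' j' := by
  unfold cellStepA
  simp only [Int.toNat_natCast]
  by_cases he : (x.length : Int) - iN = (y.length : Int) - jN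
  · have he' : y.length - jN = x.length - iN := by omega
    simp only [if_pos he]
    refine ⟨?_, ?_⟩
    · intro j' hlo hle hreg
      by_cases hj' : j' = jN
      · rw [hj']
        have h1 := H1 (jN + 1) (Nat.zero_le _) (by omega) (by omega)
        simp only [and_self, if_true, ite_true, eq_self_iff_true, h1, Option.getD_some]
        rw [Dref_sub x y ds iN jN hi he']
      · simp [hj']
        exact H2 j' (by omega) hle hreg
    · intro i' j' hne
      simp [hne]
  · by_cases hlt : (x.length : Int) - iN < (y.length : Int) - jN
    · simp only [if_neg he, if_pos hlt]
      refine ⟨?_, ?_⟩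
      · intro j' hlo hle hreg
        by_cases hj' : j' = jN
        · rw [hj']
          have h1 := H1 (jN + 1) (Nat.zero_le _) (by omega) (by omega)
          have h2 := H2 (jN + 1) (le_refl _) (by omega) (by omega)
          simp only [and_self, if_true, ite_true, eq_self_iff_true, h1, h2, Option.getD_some]
          rw [Dref_min x y ds iN jN hi hj (by omega)]
        · simp [hj']
          exact H2 j' (by omega) hle hreg
      · intro i' j' hne
        simp [hne]
    · simp only [if_neg he, if_neg hlt]
      refine ⟨?_, ?_⟩
      · intro j' hlo hle hreg
        exact H2 j' (by omega) hle hreg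
      · intro i' j' hne
        trivial

lemma pyRange_down_zero : PySem.List.pyRange (0 : Int) (-1) (-1) = [0] := by
  rw [PySem.List.pyRange_neg_one_cons (by norm_num)]
  rw [show (0:Int) - 1 = -1 by ring, PySem.List.pyRange_neg_one_eq_nil (by norm_num)]

lemma pyRange_down_succ (k : Nat) :
    PySem.List.pyRange ((k + 1 : Nat) : Int) (-1) (-1)
      = ((k + 1 : Nat) : Int) :: PySem.List.pyRange ((k : Nat) : Int) (-1) (-1) := by
  rw [PySem.List.pyRange_neg_one_cons (by push_cast; omega)]
  congr 1
  push_cast; ring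

lemma innerA (x y : List String) (ds : List (String × String × Int)) (iN : Nat)
    (hi : iN < x.length) :
    ∀ jN : Nat, jN < y.length → ∀ d : Nat → Nat → Option Int,
      RowOK x y ds d (iN + 1) 0 → RowOK x y ds d iN (jN + 1) →
      RowOK x y ds ((PySem.List.pyRange (jN : Int) (-1) (-1)).foldl (cellStepA x y ds (iN : Int)) d) iN 0 ∧
      ∀ i' j', i' ≠ iN →
        ((PySem.List.pyRange (jN : Int) (-1) (-1)).foldl (cellStepA x y ds (iN : Int)) d) i' j' = d i' j' := by
  intro jN
  induction jN with
  | zero =>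
    intro hj d H1 H2
    rw [Nat.cast_zero, pyRange_down_zero]
    simp only [List.foldl_cons, List.foldl_nil]
    have h := cellStepA_ok x y ds d iN 0 hi hj H1 H2
    rw [Nat.cast_zero] at h
    exact h
  | succ k ih =>
    intro hj d H1 H2
    rw [pyRange_down_succ k]
    simp only [List.foldl_cons]
    have hstep := cellStepA_ok x y ds d iN (k + 1) hi hj H1 H2
    have H1' : RowOK x y ds (cellStepA x y ds (iN : Int) d ((k + 1 : Nat) : Int)) (iN + 1) 0 := by
      intro j' h1 h2 h3
      rw [hstep.2 (iN + 1) j' (by omega)]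
      exact H1 j' h1 h2 h3
    have h := ih (by omega) _ H1' hstep.1
    refine ⟨h.1, ?_⟩
    intro i' j' hne
    rw [h.2 i' j' hne, hstep.2 i' j' hne]

lemma rowStepA_ok (x y : List String) (ds : List (String × String × Int))
    (d : Nat → Nat → Option Int) (iN : Nat) (hmn : x.length ≤ y.length) (hi : iN < x.length)
    (H1 : RowOK x y ds d (iN + 1) 0) :
    RowOK x y ds (rowStepA x y ds d (iN : Int)) iN 0 ∧
    ∀ i' j', i' ≠ iN → rowStepA x y ds d (iN : Int) i' j' = d i' j' := by
  unfold rowStepA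
  have hcast : (y.length : Int) - 1 = ((y.length - 1 : Nat) : Int) := by omega
  rw [hcast]
  have H2 : RowOK x y ds d iN (y.length - 1 + 1) := by
    intro j' h1 h2 h3
    exact absurd h3 (by omega)
  exact innerA x y ds iN hi (y.length - 1) (by omega) d H1 H2

def GoodA (x y : List String) (ds : List (String × String × Int))
    (d : Nat → Nat → Option Int) (ilo : Nat) : Prop :=
  ∀ i', ilo ≤ i' → i' ≤ x.length → RowOK x y ds d i' 0

lemma outerA (x y : List String) (ds : List (String × String × Int))
    (hmn : x.length ≤ y.length) :
    ∀ iN : Nat, iN < x.length → ∀ d : Nat → Nat → Option Int, GoodA x y ds d (iN + 1) →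
      GoodA x y ds ((PySem.List.pyRange (iN : Int) (-1) (-1)).foldl (rowStepA x y ds) d) 0 := by
  intro iN
  induction iN with
  | zero =>
    intro hi d HG
    rw [Nat.cast_zero, pyRange_down_zero]
    simp only [List.foldl_cons, List.foldl_nil]
    have h := rowStepA_ok x y ds d 0 hmn hi (HG 1 (le_refl _) (by omega))
    rw [Nat.cast_zero] at h
    intro i' h1 h2
    by_cases hik : i' = 0
    · subst hik; exact h.1
    · intro j' a b c
      rw [h.2 i' j' (by omega)]
      exact HG i' (by omega) h2 j' a b c
  | succ k ih =>
    intro hi d HG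
    rw [pyRange_down_succ k]
    simp only [List.foldl_cons]
    have h := rowStepA_ok x y ds d (k + 1) hmn hi (HG (k + 2) (le_refl _) (by omega))
    apply ih (by omega)
    intro i' h1 h2
    by_cases hik : i' = k + 1
    · subst hik; exact h.1
    · intro j' a b c
      rw [h.2 i' j' (by omega)]
      exact HG i' (by omega) h2 j' a b c

lemma botA (x y : List String) :
    ∀ jN : Nat, jN < y.length → ∀ d : Nat → Nat → Option Int,
      (∀ j', jN + 1 ≤ j' → j' ≤ y.length → d x.length j' = some ((SS y).getD j' 0)) →
      ∀ j', j' ≤ y.length →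
        ((PySem.List.pyRange (jN : Int) (-1) (-1)).foldl (botStep y x.length) d) x.length j'
          = some ((SS y).getD j' 0) := by
  intro jN
  induction jN with
  | zero =>
    intro hj d H j' hle
    rw [Nat.cast_zero, pyRange_down_zero]
    simp only [List.foldl_cons, List.foldl_nil]
    unfold botStep
    simp only [Int.toNat_natCast, Int.toNat_zero]
    by_cases hj' : j' = 0
    · subst hj'
      simp only [and_self, if_pos, true_and, if_true, ite_true, eq_self_iff_true]
      rw [H 1 (le_refl _) (by omega), Option.getD_some, SS_step y 0 hj, Int.add_comm]
    · simp only [hj', and_false, if_false, ite_false]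
      exact H j' (by omega) hle
  | succ k ih =>
    intro hj d H j' hle
    rw [pyRange_down_succ k]
    simp only [List.foldl_cons]
    apply ih (by omega) _ _ j' hle
    intro j'' h1 h2
    unfold botStep
    simp only [Int.toNat_natCast]
    by_cases hj'' : j'' = k + 1
    · subst hj''
      simp only [and_self, if_pos, true_and, if_true, ite_true, eq_self_iff_true]
      rw [H (k + 2) (le_refl _) (by omega), Option.getD_some, SS_step y (k + 1) hj, Int.add_comm]
    · simp only [hj'', and_false, if_false, ite_false]
      exact H j'' (by omega) h2

lemma portA_eq (x y : List String) (ds : List (String × String × Int)) :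
    asymmetric_distance x y ds = Dref x (pad x y) ds 0 0 := by
  unfold asymmetric_distance
  simp only []
  set y2 := pad x y with hy2
  have hmn : x.length ≤ y2.length := le_pad_length x y
  set n := x.length
  set m := y2.length with hm
  set d1 : Nat → Nat → Option Int :=
    fun i j => if i = n ∧ j = m then (some 0 : Option Int) else none with hd1
  have hbot : ∀ j', j' ≤ m →
      ((PySem.List.pyRange ((m : Int) - 1) (-1) (-1)).foldl (botStep y2 n) d1) n j'
        = some ((SS y2).getD j' 0) := by
    rcases Nat.eq_zero_or_pos m with h0 | h1
    · intro j' hle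
      rw [h0] at hle
      interval_cases j'
      rw [show ((m : Int) - 1) = -1 by omega, PySem.List.pyRange_neg_one_eq_nil (by norm_num)]
      have hy0 : y2 = [] := List.length_eq_zero_iff.mp h0
      simp only [List.foldl_nil, hd1]
      simp [hy0, h0, SS]
    · rw [show ((m : Int) - 1) = ((m - 1 : Nat) : Int) by omega]
      apply botA x y2 (m - 1) (by omega)
      intro j' h1 h2
      have hj' : j' = m := by omega
      subst hj'
      simp only [hd1, and_self, if_pos, true_and, if_true, ite_true, eq_self_iff_true]
      rw [SS_last]
      simp
      rfl
  set d2 := (PySem.List.pyRange ((m : Int) - 1) (-1) (-1)).foldl (botStep y2 n) d1 with hd2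
  have hGood2 : GoodA x y2 ds d2 n := by
    intro i' hge hle
    have hin : i' = n := le_antisymm hle hge
    subst hin
    intro j' _ hjle _
    rw [Dref_base x y2 ds n j' (le_refl _)]
    exact hbot j' hjle
  rcases Nat.eq_zero_or_pos n with hn0 | hn1
  · rw [show ((n : Int) - 1) = -1 by omega, PySem.List.pyRange_neg_one_eq_nil (by norm_num)]
    simp only [List.foldl_nil]
    rw [Dref_base x y2 ds 0 0 (by omega)]
    have hb := hbot 0 (Nat.zero_le _)
    rw [hn0] at hb
    rw [hb]
    rfl
  · rw [show ((n : Int) - 1) = ((n - 1 : Nat) : Int) by omega]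
    have h := outerA x y2 ds hmn (n - 1) (by omega) d2 (by
      intro i' h1 h2
      have hin : i' = n := by omega
      subst hin
      exact hGood2 n (le_refl _) (le_refl _))
    have h00 := h 0 (Nat.zero_le _) (Nat.zero_le _) 0 (Nat.zero_le _) (Nat.zero_le _) (by omega)
    rw [h00]
    rfl

-- ===== B-side lemmas =====
def lenSum (l : List String) : Int := (l.map PySem.Str.len).sum

lemma prefSum_spec (y : List String) :
    prefSum y = (List.range (y.length + 1)).map (fun j => lenSum (y.take j)) := by
  induction y using List.reverseRecOn with
  | nil => rfl
  | append_singleton ys s ih =>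
    unfold prefSum at ih ⊢
    rw [List.foldl_append, ih, List.foldl_cons, List.foldl_nil, List.length_append]
    have hlast : ((List.range (ys.length + 1)).map (fun j => lenSum (ys.take j))).getLastD 0
        = lenSum ys := by
      rw [List.range_succ, List.map_append, List.map_cons, List.map_nil,
        List.getLastD_concat, List.take_length]
    rw [hlast]
    rw [show ys.length + [s].length + 1 = (ys.length + 1) + 1 by simp]
    conv_rhs => rw [List.range_succ, List.map_append]
    congr 1
    · apply List.map_congr_left
      intro j hj
      rw [List.mem_range] at hj
      rw [List.take_append_of_le_length (by omega)]
    · simp only [List.map_cons, List.map_nil]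
      congr 1
      rw [List.take_of_length_le (by simp), lenSum, lenSum, List.map_append, List.sum_append]
      simp

lemma prefSum_getD (y : List String) (j : Nat) (hj : j ≤ y.length) :
    (prefSum y).getD j 0 = lenSum (y.take j) := by
  rw [prefSum_spec, List.getD_eq_getElem?_getD, List.getElem?_map,
    List.getElem?_range (by omega : j < y.length + 1)]
  rfl

lemma lenSum_take_succ (y : List String) (j : Nat) (hj : j < y.length) :
    lenSum (y.take (j + 1)) = lenSum (y.take j) + PySem.Str.len (y.getD j "") := by
  rw [List.take_succ, lenSum, lenSum, List.map_append, List.sum_append]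
  congr 1
  rw [List.getElem?_eq_getElem hj]
  simp [List.getD_eq_getElem?_getD, List.getElem?_eq_getElem hj]

lemma SS_getD_eq (y : List String) (j : Nat) (hj : j ≤ y.length) :
    (SS y).getD j 0 = lenSum y - lenSum (y.take j) := by
  induction y generalizing j with
  | nil =>
    have hj0 : j = 0 := by simpa using hj
    subst hj0
    simp [SS, lenSum]
  | cons s t ih =>
    cases j with
    | zero =>
      simp only [SS, List.getD_cons_zero, List.take_zero]
      have h0 : (SS t).headD 0 = (SS t).getD 0 0 := by cases SS t <;> simp
      have := ih 0 (Nat.zero_le _)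
      rw [h0, this]
      simp [lenSum]
    | succ k =>
      simp only [SS, List.getD_cons_succ, List.take_succ_cons]
      rw [ih k (by simpa using hj)]
      simp [lenSum]

-- the value the fold takes the minimum of, at match position k of row i
def Tcell (x y : List String) (ds : List (String × String × Int)) (i k : Nat) : Int :=
  lenSum (y.take k) + (dget ds (x.getD i "") (y.getD k "")).getD 0 + Dref x y ds (i + 1) (k + 1)

def suffMin (f : Nat → Int) (k w : Nat) : Int :=
  if k < w then min (f k) (suffMin f (k + 1) w) else f w
termination_by w - k
decreasing_by omega

lemma suffMin_last (f : Nat → Int) (w : Nat) : suffMin f w w = f w := by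
  rw [suffMin]; simp

lemma suffMin_step (f : Nat → Int) (k w : Nat) (h : k < w) :
    suffMin f k w = min (f k) (suffMin f (k + 1) w) := by
  rw [suffMin]; simp [h]

lemma Dref_suffMin (x y : List String) (ds : List (String × String × Int)) (i : Nat)
    (hmn : x.length ≤ y.length) (hi : i < x.length) :
    ∀ d k, k ≤ y.length - x.length + i → y.length - x.length + i - k = d →
      suffMin (Tcell x y ds i) k (y.length - x.length + i) - lenSum (y.take k)
        = Dref x y ds i k := by
  intro d
  induction d with
  | zero =>
    intro k hk hd
    have hkw : k = y.length - x.length + i := by omega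
    subst hkw
    rw [suffMin_last]
    rw [Dref_sub x y ds i _ hi (by omega)]
    unfold Tcell
    ring
  | succ d ih =>
    intro k hk hd
    have hklt : k < y.length - x.length + i := by omega
    rw [suffMin_step _ _ _ hklt]
    rw [Dref_min x y ds i k hi (by omega) (by omega)]
    have hih := ih (k + 1) (by omega) (by omega)
    have hstep := lenSum_take_succ y k (by omega)
    have hT : Tcell x y ds i k
        = lenSum (y.take k) + (dget ds (x.getD i "") (y.getD k "")).getD 0
          + Dref x y ds (i + 1) (k + 1) := rfl
    omega

lemma innerStepB_eval (y : List String) (ds : List (String × String × Int)) (s : String)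
    (S nxt : List Int) (b : Int) (r : List Int) (k : Nat) :
    innerStepB y ds s S nxt (b, r) ((k : Nat) : Int)
      = (min b (S.getD k 0 + (dget ds s (y.getD k "")).getD 0 + nxt.getD (k + 1) 0),
         r ++ [min b (S.getD k 0 + (dget ds s (y.getD k "")).getD 0 + nxt.getD (k + 1) 0)
               - S.getD k 0]) := by
  unfold innerStepB
  simp only [Int.toNat_natCast]

lemma map_range_down_succ (f : Nat → Int) (t : Nat) :
    (List.range (t + 1 + 1)).map (fun d => f (t + 1 - d))
      = f (t + 1) :: (List.range (t + 1)).map (fun d => f (t - d)) := by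
  rw [List.range_succ_eq_map, List.map_cons, List.map_map]
  congr 1
  apply List.map_congr_left
  intro a _
  show f (t + 1 - (a + 1)) = f (t - a)
  congr 1
  omega

-- ===== fold correctness for B's inner loop =====
lemma innerB (x y : List String) (ds : List (String × String × Int)) (i : Nat)
    (hmn : x.length ≤ y.length) (hi : i < x.length)
    (S nxt : List Int)
    (hS : ∀ k, k ≤ y.length → S.getD k 0 = lenSum (y.take k))
    (hnxt : ∀ k, k ≤ y.length - x.length + i + 1 → nxt.getD k 0 = Dref x y ds (i + 1) k) :
    ∀ k, k < y.length - x.length + i → ∀ r : List Int,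
      (PySem.List.pyRange (k : Int) (-1) (-1)).foldl
          (innerStepB y ds (x.getD i "") S nxt)
          (suffMin (Tcell x y ds i) (k + 1) (y.length - x.length + i), r)
        = (suffMin (Tcell x y ds i) 0 (y.length - x.length + i),
           r ++ (List.range (k + 1)).map (fun d => Dref x y ds i (k - d))) := by
  intro k
  induction k with
  | zero =>
    intro hk r
    rw [Nat.cast_zero, pyRange_down_zero]
    simp only [List.foldl_cons, List.foldl_nil]
    rw [show (0 : Int) = ((0 : Nat) : Int) from rfl, innerStepB_eval]
    have hTc : S.getD 0 0 + (dget ds (x.getD i "") (y.getD 0 "")).getD 0 + nxt.getD 1 0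
        = Tcell x y ds i 0 := by
      rw [hS 0 (by omega), hnxt 1 (by omega)]
      rfl
    rw [hTc]
    have hmin : min (suffMin (Tcell x y ds i) 1 (y.length - x.length + i)) (Tcell x y ds i 0)
        = suffMin (Tcell x y ds i) 0 (y.length - x.length + i) := by
      rw [suffMin_step _ _ _ hk, min_comm]
    rw [hmin]
    have hv := Dref_suffMin x y ds i hmn hi (y.length - x.length + i) 0 (by omega) (by omega)
    simp only [Nat.zero_add, List.range_one, List.map_cons, List.map_nil, Nat.sub_zero]
    rw [hS 0 (by omega)]
    rw [show suffMin (Tcell x y ds i) 0 (y.length - x.length + i) - lenSum (y.take 0)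
        = Dref x y ds i 0 from hv]
  | succ k ih =>
    intro hk r
    rw [pyRange_down_succ k]
    simp only [List.foldl_cons]
    rw [innerStepB_eval]
    have hTc : S.getD (k + 1) 0 + (dget ds (x.getD i "") (y.getD (k + 1) "")).getD 0
        + nxt.getD (k + 1 + 1) 0 = Tcell x y ds i (k + 1) := by
      rw [hS (k + 1) (by omega), hnxt (k + 2) (by omega)]
      rfl
    rw [hTc]
    have hmin : min (suffMin (Tcell x y ds i) (k + 1 + 1) (y.length - x.length + i))
        (Tcell x y ds i (k + 1)) = suffMin (Tcell x y ds i) (k + 1) (y.length - x.length + i) := by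
      rw [suffMin_step _ _ _ hk, min_comm]
    rw [hmin]
    have hv := Dref_suffMin x y ds i hmn hi
        (y.length - x.length + i - (k + 1)) (k + 1) (by omega) (by omega)
    rw [hS (k + 1) (by omega)]
    rw [show suffMin (Tcell x y ds i) (k + 1) (y.length - x.length + i) - lenSum (y.take (k + 1))
        = Dref x y ds i (k + 1) from hv]
    rw [ih (by omega) (r ++ [Dref x y ds i (k + 1)])]
    rw [map_range_down_succ (fun j => Dref x y ds i j) k]
    rw [List.append_assoc, List.singleton_append]

def rowOf (x y : List String) (ds : List (String × String × Int)) (i : Nat) : List Int :=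
  (List.range (y.length - x.length + i + 1)).map (fun j => Dref x y ds i j)

lemma rowOf_getD (x y : List String) (ds : List (String × String × Int)) (i k : Nat)
    (hk : k ≤ y.length - x.length + i) : (rowOf x y ds i).getD k 0 = Dref x y ds i k := by
  unfold rowOf
  rw [List.getD_eq_getElem?_getD, List.getElem?_map,
    List.getElem?_range (by omega : k < y.length - x.length + i + 1)]
  rfl

lemma rev_map_range (f : Nat → Int) (w : Nat) :
    ((List.range (w + 1)).map (fun d => f (w - d))).reverse = (List.range (w + 1)).map f := by
  apply List.ext_getElem
  · simp
  · intro j h1 h2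
    simp only [List.length_reverse, List.length_map, List.length_range] at h1
    rw [List.getElem_reverse]
    simp only [List.length_map, List.length_range]
    rw [List.getElem_map, List.getElem_range, List.getElem_map, List.getElem_range]
    congr 1
    omega

lemma rowStepB_ok (x y : List String) (ds : List (String × String × Int)) (i : Nat)
    (hmn : x.length ≤ y.length) (hi : i < x.length) :
    rowStepB x y ds (prefSum y) (rowOf x y ds (i + 1)) (i : Int) = rowOf x y ds i := by
  unfold rowStepB
  simp only [Int.toNat_natCast]
  set w := y.length - x.length + i with hw
  have hwm : w < y.length := by omega
  have hS : ∀ k, k ≤ y.length → (prefSum y).getD k 0 = lenSum (y.take k) :=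
    fun k hk => prefSum_getD y k hk
  have hnxt : ∀ k, k ≤ w + 1 → (rowOf x y ds (i + 1)).getD k 0 = Dref x y ds (i + 1) k :=
    fun k hk => rowOf_getD x y ds (i + 1) k (by omega)
  have hbest : (prefSum y).getD w 0 + (dget ds (x.getD i "") (y.getD w "")).getD 0
      + (rowOf x y ds (i + 1)).getD (w + 1) 0 = Tcell x y ds i w := by
    rw [hS w (by omega), hnxt (w + 1) (le_refl _)]
    rfl
  rw [hbest]
  have hlastv : Tcell x y ds i w - (prefSum y).getD w 0 = Dref x y ds i w := by
    rw [hS w (by omega), ← suffMin_last (Tcell x y ds i) w]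
    exact Dref_suffMin x y ds i hmn hi 0 w (le_refl _) (by omega)
  rcases Nat.eq_zero_or_pos w with h0 | h1
  · rw [show ((w : Int) - 1) = -1 by omega, PySem.List.pyRange_neg_one_eq_nil (by norm_num)]
    simp only [List.foldl_nil]
    rw [hlastv, h0]
    unfold rowOf
    rw [← hw, h0]
    simp
  · rw [show ((w : Int) - 1) = ((w - 1 : Nat) : Int) by omega]
    rw [hlastv]
    rw [show Tcell x y ds i w = suffMin (Tcell x y ds i) ((w - 1) + 1) w by
      rw [show w - 1 + 1 = w by omega, suffMin_last]]
    rw [innerB x y ds i hmn hi (prefSum y) (rowOf x y ds (i + 1)) hS hnxt (w - 1) (by omega)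
      [Dref x y ds i w]]
    rw [show w - 1 + 1 = w by omega]
    have hcons := map_range_down_succ (fun j => Dref x y ds i j) (w - 1)
    rw [show w - 1 + 1 = w by omega] at hcons
    rw [List.singleton_append, ← hcons, rev_map_range]
    unfold rowOf
    rw [← hw]

lemma outerB (x y : List String) (ds : List (String × String × Int))
    (hmn : x.length ≤ y.length) :
    ∀ i : Nat, i < x.length →
      (PySem.List.pyRange (i : Int) (-1) (-1)).foldl (rowStepB x y ds (prefSum y))
          (rowOf x y ds (i + 1))
        = rowOf x y ds 0 := by
  intro i
  induction i with
  | zero =>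
    intro hi
    rw [Nat.cast_zero, pyRange_down_zero]
    simp only [List.foldl_cons, List.foldl_nil]
    have h := rowStepB_ok x y ds 0 hmn hi
    rw [Nat.cast_zero] at h
    exact h
  | succ k ih =>
    intro hi
    rw [pyRange_down_succ k]
    simp only [List.foldl_cons]
    rw [rowStepB_ok x y ds (k + 1) hmn hi]
    exact ih (by omega)

lemma headD_map_range (f : Nat → Int) (t : Nat) :
    ((List.range (t + 1)).map f).headD 0 = f 0 := by
  rw [List.range_succ_eq_map]
  simp

lemma portB_eq (x y : List String) (ds : List (String × String × Int)) :
    asymmetric_distance_alt x y ds = Dref x (pad x y) ds 0 0 := by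
  unfold asymmetric_distance_alt
  simp only []
  set y2 := pad x y with hy2
  have hmn : x.length ≤ y2.length := le_pad_length x y
  have hbase : (List.range (y2.length + 1)).map
      (fun j => (prefSum y2).getD y2.length 0 - (prefSum y2).getD j 0)
      = rowOf x y2 ds x.length := by
    unfold rowOf
    rw [show y2.length - x.length + x.length + 1 = y2.length + 1 by omega]
    apply List.map_congr_left
    intro j hj
    rw [List.mem_range] at hj
    rw [prefSum_getD y2 y2.length (le_refl _), prefSum_getD y2 j (by omega),
      List.take_length, Dref_base x y2 ds x.length j (le_refl _),
      SS_getD_eq y2 j (by omega)]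
  rw [hbase]
  rcases Nat.eq_zero_or_pos x.length with h0 | h1
  · rw [show ((x.length : Int) - 1) = -1 by omega,
      PySem.List.pyRange_neg_one_eq_nil (by norm_num)]
    simp only [List.foldl_nil]
    rw [h0]
    unfold rowOf
    exact headD_map_range _ _
  · rw [show ((x.length : Int) - 1) = ((x.length - 1 : Nat) : Int) by omega]
    have hout := outerB x y2 ds hmn (x.length - 1) (by omega)
    rw [show x.length - 1 + 1 = x.length by omega] at hout
    rw [hout]
    unfold rowOf
    exact headD_map_range _ _

-- ===== VERDICT (by name: the statement is the Claim_ definition above) =====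
theorem asymmetric_distance_spec : Claim_equal_asymmetric_distance := by
  intro x y distances _ _
  unfold Spec_asymmetric_distance
  rw [portA_eq, portB_eq]
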